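-- pv_equiv track=rewrite | github.com/jh9875/PS | Python/BOJ/[10162] 전자레인지/main_1.py | get_press_button_count
-- ===== SOURCE A (Python) =====
-- A_BUTTON_SECOND = 60 * 5
--
-- B_BUTTON_SECOND = 60
--
-- C_BUTTON_SECOND = 10
--
-- def get_press_button_count(cooking_time: int):
--     result = {'A': 0, 'B': 0, 'C': 0}
--
--     while cooking_time > 0:
--         if cooking_time >= A_BUTTON_SECOND:
--             result['A'] += cooking_time // A_BUTTON_SECOND
--             cooking_time %= A_BUTTON_SECOND
--         elif cooking_time >= B_BUTTON_SECOND: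
--             result['B'] += cooking_time // B_BUTTON_SECOND
--             cooking_time %= B_BUTTON_SECOND
--         elif cooking_time >= C_BUTTON_SECOND:
--             result['C'] += cooking_time // C_BUTTON_SECOND
--             cooking_time %= C_BUTTON_SECOND
--         else:
--             return None
--     return result
-- ===== SOURCE B (Python) =====
-- def get_press_button_count(cooking_time: int):
--     if cooking_time <= 0:
--         return {'A': 0, 'B': 0, 'C': 0}
--     a, r = divmod(cooking_time, 300)
--     b, r = divmod(r, 60)
--     c, r = divmod(r, 10)
--     if r != 0:
--         return None
--     return {'A': a, 'B': b, 'C': c}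
-- ===== Notes on version B (the rewrite author's own statement) =====
-- stated objective: simpler
-- what changed: Replaced the while loop with if/elif guards by a straight-line divmod chain (300, 60, 10) with an explicit non-positive guard and a final remainder check.
import Mathlib
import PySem

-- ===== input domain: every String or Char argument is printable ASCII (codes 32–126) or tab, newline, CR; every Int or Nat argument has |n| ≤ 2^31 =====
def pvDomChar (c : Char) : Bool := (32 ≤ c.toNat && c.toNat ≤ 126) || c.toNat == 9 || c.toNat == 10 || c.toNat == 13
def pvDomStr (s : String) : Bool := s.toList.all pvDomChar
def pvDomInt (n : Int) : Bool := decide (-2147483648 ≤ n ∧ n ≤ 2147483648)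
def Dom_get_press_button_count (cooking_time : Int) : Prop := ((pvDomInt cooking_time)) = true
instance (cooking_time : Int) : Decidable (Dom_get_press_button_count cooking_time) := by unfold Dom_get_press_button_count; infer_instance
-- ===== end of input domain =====

-- B replaces A's while loop and if/elif guards by a straight-line divmod chain; objective: simpler.

-- ===== PORT A =====
-- The dict result has the fixed keys 'A','B','C' updated in place; it is carried as
-- three accumulators a b c and rendered in insertion order on return.
def pyA_BUTTON_SECOND : Int := 60 * 5
def pyB_BUTTON_SECOND : Int := 60
def pyC_BUTTON_SECOND : Int := 10

def getPressLoop (cooking_time a b c : Int) : Option (List (String × Int)) :=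
  if _h : cooking_time > 0 then
    if cooking_time ≥ pyA_BUTTON_SECOND then
      getPressLoop (PySem.Int.mod cooking_time pyA_BUTTON_SECOND)
        (a + PySem.Int.floordiv cooking_time pyA_BUTTON_SECOND) b c
    else if cooking_time ≥ pyB_BUTTON_SECOND then
      getPressLoop (PySem.Int.mod cooking_time pyB_BUTTON_SECOND)
        a (b + PySem.Int.floordiv cooking_time pyB_BUTTON_SECOND) c
    else if cooking_time ≥ pyC_BUTTON_SECOND then
      getPressLoop (PySem.Int.mod cooking_time pyC_BUTTON_SECOND)
        a b (c + PySem.Int.floordiv cooking_time pyC_BUTTON_SECOND)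
    else
      none
  else
    some [("A", a), ("B", b), ("C", c)]
termination_by cooking_time.toNat
decreasing_by
  all_goals
    simp only [pyA_BUTTON_SECOND, pyB_BUTTON_SECOND, pyC_BUTTON_SECOND] at *
    rw [PySem.Int.mod_eq_emod_of_pos (by omega)]
    omega

def get_press_button_count (cooking_time : Int) : Option (List (String × Int)) :=
  getPressLoop cooking_time 0 0 0

-- ===== PORT B =====
def get_press_button_count_alt (cooking_time : Int) : Option (List (String × Int)) :=
  if cooking_time ≤ 0 then
    some [("A", 0), ("B", 0), ("C", 0)]
  else
    let a := PySem.Int.floordiv cooking_time 300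
    let r1 := PySem.Int.mod cooking_time 300
    let b := PySem.Int.floordiv r1 60
    let r2 := PySem.Int.mod r1 60
    let c := PySem.Int.floordiv r2 10
    let r3 := PySem.Int.mod r2 10
    if r3 ≠ 0 then none
    else some [("A", a), ("B", b), ("C", c)]

-- ===== PRECONDITION & SPEC =====
def Spec_get_press_button_count (cooking_time : Int) (out : Option (List (String × Int))) : Prop := out = get_press_button_count_alt cooking_time
instance (cooking_time : Int) (out : Option (List (String × Int))) : Decidable (Spec_get_press_button_count cooking_time out) := by unfold Spec_get_press_button_count; infer_instance

-- ===== CLAIM (what is proved, stated in full; the proofs are below) =====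
def Claim_equal_get_press_button_count : Prop := ∀ (cooking_time : Int), Dom_get_press_button_count cooking_time → Spec_get_press_button_count cooking_time (get_press_button_count cooking_time)

-- ===== LEMMAS AND PROOFS =====

-- one loop level at a time: characterise the loop for ct < 60, then < 300, then all ct ≥ 0
theorem getPressLoop_lt60 (ct a b c : Int) (h0 : 0 ≤ ct) (h : ct < 60) :
    getPressLoop ct a b c =
      if ct % 10 = 0 then some [("A", a), ("B", b), ("C", c + ct / 10)] else none := by
  rw [getPressLoop]
  simp only [pyA_BUTTON_SECOND, pyB_BUTTON_SECOND, pyC_BUTTON_SECOND]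
  by_cases hp : ct > 0
  · rw [dif_pos hp, if_neg (by omega), if_neg (by omega)]
    by_cases h10 : ct ≥ 10
    · rw [if_pos h10, PySem.Int.mod_eq_emod_of_pos (by omega),
        PySem.Int.floordiv_eq_ediv_of_pos (by omega), getPressLoop]
      simp only [pyA_BUTTON_SECOND, pyB_BUTTON_SECOND, pyC_BUTTON_SECOND]
      by_cases hz : ct % 10 = 0
      · rw [dif_neg (by omega)]
        simp [hz]
      · rw [dif_pos (by omega : ct % 10 > 0), if_neg (by omega), if_neg (by omega),
          if_neg (by omega)]
        simp [hz]
    · rw [if_neg h10]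
      have : ct % 10 = ct := by omega
      simp [this]; omega
  · have hz : ct = 0 := by omega
    subst hz
    simp
theorem getPressLoop_lt300 (ct a b c : Int) (h0 : 0 ≤ ct) (h : ct < 300) :
    getPressLoop ct a b c =
      if ct % 10 = 0 then
        some [("A", a), ("B", b + ct / 60), ("C", c + (ct % 60) / 10)] else none := by
  by_cases h60 : ct ≥ 60
  · rw [getPressLoop]
    simp only [pyA_BUTTON_SECOND, pyB_BUTTON_SECOND, pyC_BUTTON_SECOND]
    rw [dif_pos (by omega), if_neg (by omega : ¬ ct ≥ 60 * 5), if_pos h60,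
      PySem.Int.mod_eq_emod_of_pos (by omega), PySem.Int.floordiv_eq_ediv_of_pos (by omega),
      getPressLoop_lt60 _ _ _ _ (by omega) (by omega)]
    have : ct % 60 % 10 = ct % 10 := Int.emod_emod_of_dvd ct (by norm_num)
    rw [this]
  · rw [getPressLoop_lt60 _ _ _ _ h0 (by omega)]
    have h1 : ct / 60 = 0 := by omega
    have h2 : ct % 60 = ct := by omega
    rw [h1, h2, add_zero]
theorem getPressLoop_closed (ct a b c : Int) (h0 : 0 ≤ ct) :
    getPressLoop ct a b c =
      if ct % 10 = 0 then
        some [("A", a + ct / 300), ("B", b + (ct % 300) / 60), ("C", c + (ct % 300 % 60) / 10)]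
      else none := by
  by_cases h300 : ct ≥ 300
  · rw [getPressLoop]
    simp only [pyA_BUTTON_SECOND, pyB_BUTTON_SECOND, pyC_BUTTON_SECOND]
    rw [dif_pos (by omega), if_pos (by omega : ct ≥ 60 * 5),
      PySem.Int.mod_eq_emod_of_pos (by omega), PySem.Int.floordiv_eq_ediv_of_pos (by omega),
      getPressLoop_lt300 _ _ _ _ (by omega) (by omega)]
    norm_num
  · rw [getPressLoop_lt300 _ _ _ _ h0 (by omega)]
    have h1 : ct / 300 = 0 := by omega
    have h2 : ct % 300 = ct := by omega
    simp [h1, h2]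

-- ===== VERDICT (by name: the statement is the Claim_ definition above) =====
theorem get_press_button_count_spec : Claim_equal_get_press_button_count := by
  intro ct _
  unfold Spec_get_press_button_count get_press_button_count get_press_button_count_alt
  by_cases hp : ct ≤ 0
  · rw [getPressLoop, dif_neg (by omega), if_pos hp]
  · rw [getPressLoop_closed _ _ _ _ (by omega), if_neg hp]
    simp only [PySem.Int.mod_eq_emod_of_pos (show (0:Int) < 300 by norm_num),
      PySem.Int.floordiv_eq_ediv_of_pos (show (0:Int) < 300 by norm_num)]
    rw [PySem.Int.mod_eq_emod_of_pos (show (0:Int) < 60 by norm_num),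
      PySem.Int.floordiv_eq_ediv_of_pos (show (0:Int) < 60 by norm_num),
      PySem.Int.mod_eq_emod_of_pos (show (0:Int) < 10 by norm_num),
      PySem.Int.floordiv_eq_ediv_of_pos (show (0:Int) < 10 by norm_num)]
    have h1 : ct % 300 % 60 % 10 = ct % 10 := by
      rw [Int.emod_emod_of_dvd _ (by norm_num : (10:Int) ∣ 60),
        Int.emod_emod_of_dvd _ (by norm_num : (10:Int) ∣ 300)]
    rw [h1]
    by_cases hz : ct % 10 = 0 <;> simp [hz]
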